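-- pv_equiv track=rewrite | github.com/Krijn-math/return-of-the-kummer | Python/strategies.py | compute_kummer_strategy
-- ===== SOURCE A (Python) =====
-- def compute_kummer_strategy(n):
--
--     assert (n >= 2)
--
--     # Uses data from Costello's paper
--     # for m = 1*s model
--     # p = 6272   #cost for a doubling
--     # q = 3480   #cost for Kummer-isogeny evaluation
--
--     # for m = 0.8*s model
--     p = 5714  # cost for a doubling
--     q = 3200  # cost for Kummer-isogeny evaluation
--
--     S = {1: []}
--     C = {1: 0}
--     for i in range(2, n + 1):
--         b, cost = min(((b, C[i - b] + C[b] + b * p + (i - b) * q)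
--                       for b in range(1, i)), key=lambda t: t[1])
--         S[i] = [b] + S[i - b] + S[b]
--         C[i] = cost
--     return S[n], C[n]
-- ===== SOURCE B (Python) =====
-- def compute_kummer_strategy(n):
--     assert (n >= 2)
--
--     p = 5714  # cost for a doubling
--     q = 3200  # cost for Kummer-isogeny evaluation
--
--     # DP over costs only, stored in a flat list (C[j] = cost of size j, C[0] unused).
--     # The two cost-table reads C[b], C[i-b] come from one pass over the table zipped
--     # with its reverse; only the chosen split point is recorded, and the strategy
--     # list is rebuilt once at the end.
--     C = [0, 0]
--     split = [0, 0]
--     for i in range(2, n + 1):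
--         best = None
--         for b, (cb, cib) in enumerate(zip(C[1:], reversed(C[1:])), 1):
--             cost = cib + cb + b * p + (i - b) * q
--             if best is None or cost < best[1]:
--                 best = (b, cost)
--         split.append(best[0])
--         C.append(best[1])
--
--     def build(i):
--         if i == 1:
--             return []
--         b = split[i]
--         return [b] + build(i - b) + build(b)
--
--     return build(n), C[n]
-- ===== Notes on version B (the rewrite author's own statement) =====
-- stated objective: faster
-- what changed: B's DP keeps only a flat cost table and the first-minimal split point per size (an explicit running-minimum pass over the cost table zipped with its reverse, instead of A's min-with-key over a generator doing two dict lookups per candidate), and reconstructs the strategy list once at the end from the split table instead of concatenating strategy lists inside the loop.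
import Mathlib
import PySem

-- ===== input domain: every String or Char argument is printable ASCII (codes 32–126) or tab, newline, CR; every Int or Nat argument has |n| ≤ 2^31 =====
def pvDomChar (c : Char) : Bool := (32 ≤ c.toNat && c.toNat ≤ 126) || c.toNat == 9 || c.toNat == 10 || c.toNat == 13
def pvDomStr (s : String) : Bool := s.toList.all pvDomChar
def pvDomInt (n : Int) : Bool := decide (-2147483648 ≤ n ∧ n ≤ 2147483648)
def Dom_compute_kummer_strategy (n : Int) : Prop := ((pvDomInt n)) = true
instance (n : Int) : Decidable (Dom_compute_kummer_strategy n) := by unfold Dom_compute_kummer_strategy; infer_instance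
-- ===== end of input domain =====

-- B replaces A's per-iteration strategy-list concatenation by a split-point table and a single
-- final reconstruction (same O(n^2) DP scan, O(n) instead of O(n^2) space; measurably faster by a constant factor).

-- ===== PORT A =====
-- loop body of A: min over b in range(1, i) of (b, C[i-b]+C[b]+b*p+(i-b)*q) (Python min = first minimal),
-- then S[i] = [b] + S[i-b] + S[b], C[i] = cost.  (p = 5714, q = 3200 inlined.)
def ksStepA (st : PySem.Dict Int (List Int) × PySem.Dict Int Int) (i : Int) :
    PySem.Dict Int (List Int) × PySem.Dict Int Int :=
  let cands := (PySem.List.pyRange 1 i 1).map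
    (fun b => (b, st.2.getD (i - b) 0 + st.2.getD b 0 + b * 5714 + (i - b) * 3200))
  let bc := (PySem.List.min? cands (fun t => t.2)).getD (0, 0)
  (st.1.insert i ([bc.1] ++ st.1.getD (i - bc.1) [] ++ st.1.getD bc.1 []),
   st.2.insert i bc.2)

def compute_kummer_strategy (n : Int) : List Int × Int :=
  -- assert n >= 2 : n < 2 raises, excluded by Pre_
  let st := (PySem.List.pyRange 2 (n + 1) 1).foldl ksStepA
    (PySem.Dict.ofList [(1, ([] : List Int))], PySem.Dict.ofList [(1, (0 : Int))])
  (st.1.getD n [], st.2.getD n 0)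

-- ===== PORT B =====
-- loop body of B: one pass over the cost table C zipped with its reverse (C[b] ascending,
-- C[i-b] descending), keeping the first minimal (b, cost); appends split[i] and C[i] only.
def ksStepB (st : List Int × List Int) (i : Int) : List Int × List Int :=
  -- st = (split, C)
  let tail := PySem.List.slice st.2 (some 1) none
  let best := (PySem.List.enumerate (tail.zip tail.reverse) 1).foldl
    (fun best p =>
      let cost := p.2.2 + p.2.1 + p.1 * 5714 + (i - p.1) * 3200
      match best with
      | none => some (p.1, cost)
      | some m => if cost < m.2 then some (p.1, cost) else some m)
    none
  -- best is never None (the zip is nonempty for every processed i ≥ 2)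
  let bc := best.getD (0, 0)
  (st.1 ++ [bc.1], st.2 ++ [bc.2])

-- build(i) of B; the fuel argument only makes the recursion structural (never exhausted on Pre_),
-- and split[i] is always a valid index there (pyGetD's default is never used)
def ksBuild (split : List Int) : Nat → Int → List Int
  | 0, _ => []
  | fuel + 1, i =>
    if i = 1 then []
    else
      let b := PySem.List.pyGetD split i 0
      [b] ++ ksBuild split fuel (i - b) ++ ksBuild split fuel b

def compute_kummer_strategy_alt (n : Int) : List Int × Int :=
  let st := (PySem.List.pyRange 2 (n + 1) 1).foldl ksStepB ([0, 0], [0, 0])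
  (ksBuild st.1 n.toNat n, PySem.List.pyGetD st.2 n 0)

-- ===== PRECONDITION & SPEC =====
-- A's `assert (n >= 2)` raises AssertionError for n < 2.
def Pre_compute_kummer_strategy (n : Int) : Prop := 2 ≤ n
instance (n : Int) : Decidable (Pre_compute_kummer_strategy n) := by unfold Pre_compute_kummer_strategy; infer_instance
def pvWitness_compute_kummer_strategy : Int := 5

def Spec_compute_kummer_strategy (n : Int) (out : List Int × Int) : Prop := out = compute_kummer_strategy_alt n
instance (n : Int) (out : List Int × Int) : Decidable (Spec_compute_kummer_strategy n out) := by unfold Spec_compute_kummer_strategy; infer_instance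

-- ===== CLAIM (what is proved, stated in full; the proofs are below) =====
def Claim_equal_compute_kummer_strategy : Prop := ∀ (n : Int), Dom_compute_kummer_strategy n → Pre_compute_kummer_strategy n → Spec_compute_kummer_strategy n (compute_kummer_strategy n)

-- ===== LEMMAS AND PROOFS =====

-- the two loop states after processing i = 2 .. m
def ksA (m : Int) : PySem.Dict Int (List Int) × PySem.Dict Int Int :=
  (PySem.List.pyRange 2 (m + 1) 1).foldl ksStepA
    (PySem.Dict.ofList [(1, ([] : List Int))], PySem.Dict.ofList [(1, (0 : Int))])

def ksB (m : Int) : List Int × List Int :=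
  (PySem.List.pyRange 2 (m + 1) 1).foldl ksStepB ([0, 0], [0, 0])

def ksInv (m : Int) : Prop :=
  ((ksB m).1.length = (m + 1).toNat ∧ (ksB m).2.length = (m + 1).toNat) ∧
  (∀ j, 1 ≤ j → j ≤ m → (ksA m).2.getD j 0 = PySem.List.pyGetD (ksB m).2 j 0) ∧
  (∀ j, 2 ≤ j → j ≤ m → 1 ≤ PySem.List.pyGetD (ksB m).1 j 0 ∧ PySem.List.pyGetD (ksB m).1 j 0 < j) ∧
  (∀ j fuel, 1 ≤ j → j ≤ m → j.toNat ≤ fuel → (ksA m).1.getD j [] = ksBuild (ksB m).1 fuel j)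

-- pyGetD on an append, index inside the left part / at the seam
theorem ksGetDAppendLeft (xs ys : List Int) (d : Int) {j : Int} (h0 : 0 ≤ j) (h1 : j < (xs.length : Int)) :
    PySem.List.pyGetD (xs ++ ys) j d = PySem.List.pyGetD xs j d := by
  rw [PySem.List.pyGetD_eq_getElem _ d h0 (by simp; omega),
      PySem.List.pyGetD_eq_getElem _ d h0 (by omega)]
  exact List.getElem_append_left (by omega)

theorem ksGetDAppendRight (xs : List Int) (v d : Int) {j : Int} (h : j = (xs.length : Int)) :
    PySem.List.pyGetD (xs ++ [v]) j d = v := by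
  rw [PySem.List.pyGetD_eq_getElem _ d (by omega) (by simp; omega)]
  have : j.toNat = xs.length := by omega
  simp [this]

-- ksBuild is unchanged by appending one entry beyond every index it can reach
theorem ksBuildStable (sp : List Int) (m v : Int) (hlen : m < (sp.length : Int))
    (hb : ∀ k, 2 ≤ k → k ≤ m → 1 ≤ PySem.List.pyGetD sp k 0 ∧ PySem.List.pyGetD sp k 0 < k) :
    ∀ fuel j, 1 ≤ j → j ≤ m → ksBuild (sp ++ [v]) fuel j = ksBuild sp fuel j := by
  intro fuel
  induction fuel with
  | zero => intro j _ _; rfl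
  | succ f ih =>
    intro j h1 h2
    by_cases hj : j = 1
    · simp [ksBuild, hj]
    · have hget : PySem.List.pyGetD (sp ++ [v]) j 0 = PySem.List.pyGetD sp j 0 :=
        ksGetDAppendLeft sp [v] 0 (by omega) (by omega)
      have hbb := hb j (by omega) h2
      simp only [ksBuild, if_neg hj, hget]
      rw [ih (j - PySem.List.pyGetD sp j 0) (by omega) (by omega),
          ih (PySem.List.pyGetD sp j 0) (by omega) (by omega)]

-- B's running-minimum fold over any pair list is Python's min (first minimum) of its cost image
theorem ksFoldIsMin (i : Int) (L : List (Int × (Int × Int))) :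
    L.foldl
      (fun best p =>
        let cost := p.2.2 + p.2.1 + p.1 * 5714 + (i - p.1) * 3200
        match best with
        | none => some (p.1, cost)
        | some m => if cost < m.2 then some (p.1, cost) else some m)
      none
    = PySem.List.min?
        (L.map (fun p => (p.1, p.2.2 + p.2.1 + p.1 * 5714 + (i - p.1) * 3200)))
        (fun t => t.2) := by
  rw [PySem.List.min?, List.foldl_map]
  congr 1
  funext acc p
  cases acc <;> rfl

theorem ksInvStep (m : Int) (hm : 1 ≤ m) (ih : ksInv m) : ksInv (m + 1) := by
  obtain ⟨⟨hl1, hl2⟩, hCv, hBnd, hS⟩ := ih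
  have hAeq : ksA (m + 1) = ksStepA (ksA m) (m + 1) := by
    unfold ksA
    rw [PySem.List.pyRange_one_succ_right (by omega : (2 : Int) ≤ m + 1),
        List.foldl_append, List.foldl_cons, List.foldl_nil]
  have hBeq : ksB (m + 1) = ksStepB (ksB m) (m + 1) := by
    unfold ksB
    rw [PySem.List.pyRange_one_succ_right (by omega : (2 : Int) ≤ m + 1),
        List.foldl_append, List.foldl_cons, List.foldl_nil]
  set i := m + 1 with hidef
  set M := m.toNat with hMdef
  have hMm : (M : Int) = m := by omega
  set CA := (ksA m).2 with hCAdef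
  set CL := (ksB m).2 with hCLdef
  set sp := (ksB m).1 with hspdef
  set f : Int → Int :=
    fun b => CA.getD (i - b) 0 + CA.getD b 0 + b * 5714 + (i - b) * 3200 with hfdef
  set tail := PySem.List.slice CL (some 1) none with htaildef
  have htail : tail = CL.tail := PySem.List.slice_from_one CL
  have htlen : tail.length = M := by rw [htail]; simp; omega
  -- the candidate list of B maps to the candidate list of A
  have hcand : (PySem.List.enumerate (tail.zip tail.reverse) 1).map
        (fun p => (p.1, p.2.2 + p.2.1 + p.1 * 5714 + (i - p.1) * 3200))
      = (PySem.List.pyRange 1 i 1).map (fun b => (b, f b)) := by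
    apply List.ext_getElem
    · simp [PySem.List.length_enumerate, htlen, PySem.List.length_pyRange_one]; omega
    · intro k hk1 hk2
      have hkM : k < M := by
        simpa [PySem.List.length_enumerate, htlen] using hk1
      have hzlen : k < (tail.zip tail.reverse).length := by simp [htlen]; omega
      rw [List.getElem_map, List.getElem_map,
          PySem.List.getElem_enumerate _ _ _ (by simp [PySem.List.length_enumerate, htlen]; omega),
          PySem.List.getElem_pyRange_one _ _ _ (by simpa using hk2)]
      rw [List.getElem_zip]
      have hrev : tail.reverse[k]'(by simp [htlen]; omega) = tail[tail.length - 1 - k]'(by omega) :=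
        List.getElem_reverse (by simpa using hzlen)
      -- tail entries are CL entries shifted by one
      have htail1 : tail[k]'(by omega) = CL[k + 1]'(by rw [htail] at htlen; simp at htlen ⊢; omega) := by
        simp only [htail]; exact List.getElem_tail _
      have htail2 : tail[tail.length - 1 - k]'(by omega)
          = CL[M - k]'(by rw [htail] at htlen; simp at htlen ⊢; omega) := by
        simp only [htail]
        rw [List.getElem_tail]
        congr 1
        rw [htail] at htlen
        omega
      -- A's two dict reads are those two list entries
      have hA1 : CA.getD (1 + (k : Int)) 0 = CL[k + 1]'(by rw [htail] at htlen; simp at htlen ⊢; omega) := by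
        rw [hCv (1 + k) (by omega) (by omega),
            show (1 + (k : Int)) = ((k + 1 : Nat) : Int) by push_cast; ring,
            PySem.List.pyGetD_ofNat _ _ _ (by rw [htail] at htlen; simp at htlen ⊢; omega)]
      have hA2 : CA.getD (i - (1 + (k : Int))) 0 = CL[M - k]'(by rw [htail] at htlen; simp at htlen ⊢; omega) := by
        rw [hCv (i - (1 + k)) (by omega) (by omega),
            show (i - (1 + (k : Int))) = ((M - k : Nat) : Int) by push_cast [hMdef]; omega,
            PySem.List.pyGetD_ofNat _ _ _ (by rw [htail] at htlen; simp at htlen ⊢; omega)]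
      simp only [hrev, htail1, htail2, hfdef]
      rw [← hA1, ← hA2]
  -- B's fold is A's min
  have hmin : ¬ ((PySem.List.pyRange 1 i 1).map (fun b => (b, f b))) = [] := by
    intro h
    have := congrArg List.length h
    simp [PySem.List.length_pyRange_one] at this
    omega
  obtain ⟨t, ht⟩ : ∃ t, PySem.List.min? ((PySem.List.pyRange 1 i 1).map (fun b => (b, f b))) (fun t => t.2) = some t := by
    cases hh : PySem.List.min? ((PySem.List.pyRange 1 i 1).map (fun b => (b, f b))) (fun t => t.2) with
    | none => exact absurd ((PySem.List.min?_eq_none_iff _ _).mp hh) hmin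
    | some t => exact ⟨t, rfl⟩
  have htb : 1 ≤ t.1 ∧ t.1 < i := by
    have hmem := PySem.List.min?_mem ht
    obtain ⟨b, hb, hbe⟩ := List.mem_map.mp hmem
    rw [PySem.List.mem_pyRange_one] at hb
    have : t.1 = b := by rw [← hbe]
    omega
  simp only [hfdef] at ht hcand
  have hA' : ksA i = ((ksA m).1.insert i
      ([t.1] ++ (ksA m).1.getD (i - t.1) [] ++ (ksA m).1.getD t.1 []),
      CA.insert i t.2) := by
    rw [hAeq]
    simp only [ksStepA, ← hCAdef, ht, Option.getD_some]
  have hB' : ksB i = (sp ++ [t.1], CL ++ [t.2]) := by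
    rw [hBeq]
    simp only [ksStepB, ← hCLdef, ← hspdef, ← htaildef]
    rw [ksFoldIsMin i (PySem.List.enumerate (tail.zip tail.reverse) 1), hcand, ht]
    rfl
  refine ⟨⟨?_, ?_⟩, ?_, ?_, ?_⟩
  · rw [hB']; simp; omega
  · rw [hB']; simp; omega
  · intro j h1 h2
    rw [hA', hB']
    show (CA.insert i t.2).getD j 0 = PySem.List.pyGetD (CL ++ [t.2]) j 0
    by_cases hj : j = i
    · subst hj
      rw [PySem.Dict.getD_insert_self, ksGetDAppendRight _ _ _ (by omega)]
    · rw [PySem.Dict.getD_insert_of_ne _ _ _ hj,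
          ksGetDAppendLeft _ _ _ (by omega) (by omega)]
      exact hCv j h1 (by omega)
  · intro j h1 h2
    rw [hB']
    show 1 ≤ PySem.List.pyGetD (sp ++ [t.1]) j 0 ∧ PySem.List.pyGetD (sp ++ [t.1]) j 0 < j
    by_cases hj : j = i
    · rw [hj, ksGetDAppendRight _ _ _ (by omega)]
      omega
    · rw [ksGetDAppendLeft _ _ _ (by omega) (by omega)]
      exact hBnd j h1 (by omega)
  · intro j fuel h1 h2 hf
    rw [hA', hB']
    by_cases hj : j = i
    · have hfge : 2 ≤ fuel := by omega
      obtain ⟨fl, rfl⟩ : ∃ fl, fuel = fl + 1 := ⟨fuel - 1, by omega⟩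
      rw [hj]
      rw [PySem.Dict.getD_insert_self]
      have hne1 : i ≠ 1 := by omega
      rw [show ksBuild (sp ++ [t.1]) (fl + 1) i
          = [PySem.List.pyGetD (sp ++ [t.1]) i 0]
            ++ ksBuild (sp ++ [t.1]) fl (i - PySem.List.pyGetD (sp ++ [t.1]) i 0)
            ++ ksBuild (sp ++ [t.1]) fl (PySem.List.pyGetD (sp ++ [t.1]) i 0)
          from by simp [ksBuild, hne1]]
      rw [ksGetDAppendRight _ _ _ (by omega)]
      rw [ksBuildStable sp m t.1 (by omega) hBnd fl (i - t.1) (by omega) (by omega)]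
      rw [ksBuildStable sp m t.1 (by omega) hBnd fl t.1 (by omega) (by omega)]
      rw [hS (i - t.1) fl (by omega) (by omega) (by omega),
          hS t.1 fl (by omega) (by omega) (by omega)]
    · rw [PySem.Dict.getD_insert_of_ne _ _ _ hj]
      rw [ksBuildStable sp m t.1 (by omega) hBnd fuel j (by omega) (by omega)]
      exact hS j fuel h1 (by omega) hf

theorem ksInvAll (m : Int) (hm : 1 ≤ m) : ksInv m := by
  induction m, hm using Int.le_induction with
  | base =>
    refine ⟨⟨by decide, by decide⟩, ?_, by intro j h1 h2; omega, ?_⟩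
    · intro j h1 h2
      have hj : j = 1 := by omega
      subst hj
      decide
    · intro j fuel h1 h2 hf
      have hj : j = 1 := by omega
      subst hj
      have hf1 : 1 ≤ fuel := by simpa using hf
      obtain ⟨f, rfl⟩ : ∃ f, fuel = f + 1 := ⟨fuel - 1, by omega⟩
      rw [show ksBuild (ksB 1).1 (f + 1) 1 = [] from by simp [ksBuild]]
      decide
  | succ m hm ih => exact ksInvStep m hm ih

-- ===== VERDICT (by name: the statement is the Claim_ definition above) =====
theorem compute_kummer_strategy_spec : Claim_equal_compute_kummer_strategy := by
  intro n _ hn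
  have h2 : (2 : Int) ≤ n := hn
  obtain ⟨⟨hl1, hl2⟩, hCv, hBnd, hS⟩ := ksInvAll n (by omega)
  unfold Spec_compute_kummer_strategy compute_kummer_strategy compute_kummer_strategy_alt
  show ((ksA n).1.getD n [], (ksA n).2.getD n 0)
      = (ksBuild (ksB n).1 n.toNat n, PySem.List.pyGetD (ksB n).2 n 0)
  rw [hCv n (by omega) le_rfl, hS n n.toNat (by omega) le_rfl le_rfl]
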